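-- pv_equiv track=rewrite | github.com/tfer2442/myAlgorithm | 프로그래머스/lv1/17681. ［1차］ 비밀지도/［1차］ 비밀지도.py | solution
-- ===== SOURCE A (Python) =====
-- def solution(n, arr1, arr2):
--     answer = [[0]*n for _ in range(n)]
--     answer2 = []
--     cnt = 0
--     for i, j in zip(arr1, arr2):
--         l1 = []
--         l2 = []
--         while True:
--             if i == 0:
--                 l1.append(0)
--                 break
--             if i == 1:
--                 l1.append(1)
--                 break
--             if i % 2 == 1:
--                 i = i//2
--                 l1.append(1)
--             else:
--                 i = i//2
--                 l1.append(0)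
--
--         lenl = len(l1)
--         for _ in range(lenl,n):
--             l1.append(0)
--
--         while True:
--             if j == 0:
--                 l2.append(0)
--                 break
--             if j == 1:
--                 l2.append(1)
--                 break
--             if j % 2 == 1:
--                 j = j//2
--                 l2.append(1)
--             else:
--                 j = j//2
--                 l2.append(0)
--
--         lenl = len(l2)
--         for _ in range(lenl,n):
--             l2.append(0)
--
--         for b in range(n-1, -1, -1):
--                 if (l1[n-b-1] == 1) or (l2[n-b-1] == 1):
--                     answer[cnt][b] = '#'
--                 else:
--                     answer[cnt][b] = ' '
--         cnt += 1
--
--     for i in range(n):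
--         tmp = ""
--         for j in range(n):
--             if answer[i][j] == '#':
--                 tmp += "#"
--             else:
--                 tmp += " "
--         answer2.append(tmp)
--     return answer2
-- ===== SOURCE B (Python) =====
-- def solution(n, arr1, arr2):
--     rows = [''.join('#' if ((i | j) >> k) & 1 else ' ' for k in range(n - 1, -1, -1))
--             for i, j in zip(arr1, arr2)]
--     rows += [' ' * n] * (n - len(rows))
--     return rows
-- ===== Notes on version B (the rewrite author's own statement) =====
-- stated objective: simpler
-- what changed: B drops A's per-number while-loop bit decomposition, manual zero-padding and mutable n×n grid (filled back-to-front, then re-scanned into strings): it maps once over zip(arr1, arr2), ORs each pair first, and reads each of the n bits with a shift, appending literal all-space rows for the remaining grid lines.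
-- outside the precondition, e.g. on solution(0, [1], [1]): A returns [], B returns ['']; on solution(-1, [2], [3]): A returns [], B returns ['']
import Mathlib
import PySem

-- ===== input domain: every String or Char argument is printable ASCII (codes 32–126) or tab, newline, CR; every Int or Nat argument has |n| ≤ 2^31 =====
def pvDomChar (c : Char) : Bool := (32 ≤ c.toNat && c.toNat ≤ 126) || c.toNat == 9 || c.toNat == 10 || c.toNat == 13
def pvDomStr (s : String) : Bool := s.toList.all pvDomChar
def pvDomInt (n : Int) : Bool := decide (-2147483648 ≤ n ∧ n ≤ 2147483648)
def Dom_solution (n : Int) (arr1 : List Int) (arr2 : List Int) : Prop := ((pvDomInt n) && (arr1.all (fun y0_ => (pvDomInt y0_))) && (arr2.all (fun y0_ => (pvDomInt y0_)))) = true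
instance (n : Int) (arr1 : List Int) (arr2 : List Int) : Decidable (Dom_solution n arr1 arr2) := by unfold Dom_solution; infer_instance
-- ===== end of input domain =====

-- B replaces A's hand-rolled bit-decomposition loops and mutable n×n grid by a single map over
-- the pairs that ORs first and reads bits by shifting (objective: simpler).

-- ===== PORT A =====
-- the `while True` bit loop of A, LSB first; it diverges in Python for negative input
-- (Pre_ excludes that), here that unreachable branch returns []
def pvBits (i : Int) : List Int :=
  if i = 0 then [0]
  else if i = 1 then [1]
  else if _h : 2 ≤ i then
    (if PySem.Int.mod i 2 = 1 then (1 : Int) else 0) :: pvBits (PySem.Int.floordiv i 2)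
  else []
termination_by i.toNat
decreasing_by
  rw [PySem.Int.floordiv_eq_ediv_of_pos (by omega : (0:Int) < 2)]
  omega

-- A's grid cells hold either the int 0 (initial) or the strings '#'/' '; the final pass only
-- compares cells against '#', so cells are ported as String with "0" as the initial value.
-- One iteration of A's `for i, j in zip(arr1, arr2)` body; l1[n-b-1] is in range under Pre_,
-- ported as getD.
def pvStep (n : Int) (st : List (List String) × Nat) (p : Int × Int) : List (List String) × Nat :=
  let l1 := pvBits p.1
  let l1 := l1 ++ List.replicate ((n : Int) - l1.length).toNat 0
  let l2 := pvBits p.2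
  let l2 := l2 ++ List.replicate ((n : Int) - l2.length).toNat 0
  let ans := (PySem.List.pyRange (n - 1) (-1) (-1)).foldl (fun ans b =>
      let c := if l1.getD (n - b - 1).toNat 0 = 1 ∨ l2.getD (n - b - 1).toNat 0 = 1
               then "#" else " "
      ans.set st.2 ((ans.getD st.2 []).set b.toNat c)) st.1
  (ans, st.2 + 1)

-- `tmp += "#"` is ported as appending the char to a List Char, String.ofList at the end
-- (Lean's String.append is kernel-opaque)
def solution (n : Int) (arr1 : List Int) (arr2 : List Int) : List String :=
  let answer0 : List (List String) := List.replicate n.toNat (List.replicate n.toNat "0")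
  let st := (arr1.zip arr2).foldl (pvStep n) (answer0, 0)
  (PySem.List.pyRange 0 n 1).map (fun i =>
      String.ofList ((PySem.List.pyRange 0 n 1).foldl (fun tmp j =>
        tmp ++ [if (st.1.getD i.toNat []).getD j.toNat "0" = "#" then '#' else ' ']) []))

-- ===== PORT B =====
-- ''.join over single chars is String.ofList of the char list; Python's (m >> k) & 1 with k ≥ 0
-- is PySem.Int.band (m >>> k.toNat) 1 (exact: every k produced by range(n-1,-1,-1) is ≥ 0)
def solution_alt (n : Int) (arr1 : List Int) (arr2 : List Int) : List String :=
  let rows := (arr1.zip arr2).map (fun p =>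
      String.ofList ((PySem.List.pyRange (n - 1) (-1) (-1)).map (fun k =>
        if PySem.Int.band (PySem.Int.bor p.1 p.2 >>> k.toNat) 1 = 1 then '#' else ' ')))
  rows ++ List.replicate ((n : Int) - rows.length).toNat (String.ofList (List.replicate n.toNat ' '))

-- ===== PRECONDITION & SPEC =====
-- Pre_ excludes: negative zipped elements (A's while-loop never terminates), more pairs than n
-- with n ≥ 1 (A raises IndexError writing row cnt = n), and n ≤ 0 with a nonempty pair list
-- (degenerate corner: A ignores the pairs and returns [], B returns one empty string per pair).
def Pre_solution (n : Int) (arr1 : List Int) (arr2 : List Int) : Prop :=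
  (arr1.zip arr2).length ≤ n.toNat ∧ ∀ p ∈ arr1.zip arr2, 0 ≤ p.1 ∧ 0 ≤ p.2
instance (n : Int) (arr1 : List Int) (arr2 : List Int) : Decidable (Pre_solution n arr1 arr2) := by
  unfold Pre_solution; infer_instance

def pvWitness_solution : Int × List Int × List Int := (3, [1, 2], [6, 5])

def Spec_solution (n : Int) (arr1 : List Int) (arr2 : List Int) (out : List String) : Prop := out = solution_alt n arr1 arr2
instance (n : Int) (arr1 : List Int) (arr2 : List Int) (out : List String) : Decidable (Spec_solution n arr1 arr2 out) := by unfold Spec_solution; infer_instance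

-- ===== CLAIM (what is proved, stated in full; the proofs are below) =====
def Claim_equal_solution : Prop := ∀ (n : Int) (arr1 : List Int) (arr2 : List Int), Dom_solution n arr1 arr2 → Pre_solution n arr1 arr2 → Spec_solution n arr1 arr2 (solution n arr1 arr2)

-- ===== LEMMAS AND PROOFS =====

lemma pvBits_getD (i : Int) (hi : 0 ≤ i) (t : Nat) :
    (pvBits i).getD t 0 = if i.toNat.testBit t then 1 else 0 := by
  fun_induction pvBits i generalizing t with
  | case1 => cases t <;> simp [List.getD]
  | case2 _ => cases t <;> simp [List.getD, Nat.testBit_succ]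
  | case3 i h0 h1 h2 ih =>
    have hm : PySem.Int.mod i 2 = ((i.toNat % 2 : Nat) : Int) := by
      have := PySem.Int.mod_natCast i.toNat 2
      rwa [Int.toNat_of_nonneg hi] at this
    have hd : PySem.Int.floordiv i 2 = ((i.toNat / 2 : Nat) : Int) := by
      have := PySem.Int.floordiv_natCast i.toNat 2
      rwa [Int.toNat_of_nonneg hi] at this
    cases t with
    | zero =>
      simp only [List.getD_cons_zero, Nat.testBit_zero]
      rcases Nat.mod_two_eq_zero_or_one i.toNat with h | h <;> simp [h] <;> omega
    | succ t =>
      simp only [List.getD_cons_succ]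
      rw [ih (by rw [hd]; exact Int.natCast_nonneg _) t]
      rw [hd, Int.toNat_natCast, Nat.testBit_add_one]
  | case4 => omega

lemma pvBits_lt (i : Int) (hi : 0 ≤ i) : i.toNat < 2 ^ (pvBits i).length := by
  fun_induction pvBits i with
  | case1 => simp
  | case2 _ => simp
  | case3 i h0 h1 h2 ih =>
    have hd : PySem.Int.floordiv i 2 = ((i.toNat / 2 : Nat) : Int) := by
      have := PySem.Int.floordiv_natCast i.toNat 2
      rwa [Int.toNat_of_nonneg hi] at this
    have := ih (by rw [hd]; exact Int.natCast_nonneg _)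
    rw [hd, Int.toNat_natCast] at this
    simp only [List.length_cons, pow_succ]
    omega
  | case4 => omega

lemma pad_getD (i : Int) (hi : 0 ≤ i) (m t : Nat) :
    ((pvBits i ++ List.replicate m (0 : Int)).getD t 0 = 1) ↔ i.toNat.testBit t := by
  by_cases ht : t < (pvBits i).length
  · rw [List.getD_append _ _ _ _ ht, pvBits_getD i hi t]
    split <;> simp_all
  · have h1 : (pvBits i ++ List.replicate m (0:Int)).getD t 0 = 0 := by
      rcases lt_or_ge t ((pvBits i).length + m) with h | h
      · rw [List.getD_eq_getElem _ _ (by simp; omega)]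
        rw [List.getElem_append_right (by omega)]
        simp
      · rw [List.getD_eq_default _ _ (by simp; omega)]
    rw [h1]
    have : i.toNat.testBit t = false :=
      Nat.testBit_eq_false_of_lt (lt_of_lt_of_le (pvBits_lt i hi)
        (Nat.pow_le_pow_right (by norm_num) (by omega)))
    simp [this]

lemma and_one_eq (m k : Nat) : (m >>> k) &&& 1 = (if m.testBit k then 1 else 0) := by
  rcases h : m.testBit k <;> simp [Nat.testBit] at h ⊢ <;> omega

lemma set_drop_lem {α : Type} (l : List α) (i : Nat) (x : α) (h : i < l.length) :
    (l.set i x).drop i = x :: l.drop (i+1) := by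
  rw [List.drop_set]
  simp only [Nat.lt_irrefl, if_false, Nat.sub_self]
  rw [List.drop_eq_getElem_cons h]
  rfl

-- factor A's inner b-loop out of the grid: it only rewrites row t
lemma foldl_set2 {α : Type} (c : Int → α) :
    ∀ (L : List Int) (acc : List (List α)) (t : Nat), t < acc.length →
    L.foldl (fun ans b => ans.set t ((ans.getD t []).set b.toNat (c b))) acc
      = acc.set t (L.foldl (fun r b => r.set b.toNat (c b)) (acc.getD t [])) := by
  intro L
  induction L with
  | nil =>
    intro acc t ht
    simp only [List.foldl_nil]
    rw [List.getD_eq_getElem _ _ ht, List.set_getElem_self]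
  | cons b L ih =>
    intro acc t ht
    simp only [List.foldl_cons]
    rw [ih _ t (by simpa using ht)]
    have hg : (acc.set t ((acc.getD t []).set b.toNat (c b))).getD t []
        = (acc.getD t []).set b.toNat (c b) := by
      rw [List.getD_eq_getElem _ _ (by simpa using ht)]
      exact List.getElem_set_self (by simpa using ht)
    rw [hg, List.set_set]

-- A's descending b-loop fills positions M-1 … 0 of the row
lemma foldl_rowset {α : Type} (c : Int → α) :
    ∀ (M N : Nat) (row : List α), M ≤ N → row.length = N →
    (PySem.List.pyRange ((M : Int) - 1) (-1) (-1)).foldl (fun r b => r.set b.toNat (c b)) row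
      = ((List.range M).map (fun (k : Nat) => c (k : Int))) ++ row.drop M := by
  intro M
  induction M with
  | zero =>
    intro N row _ _
    rw [PySem.List.pyRange_neg_one_eq_nil (by omega)]
    simp
  | succ M ih =>
    intro N row hMN hrow
    rw [PySem.List.pyRange_neg_one_cons (by push_cast; omega)]
    simp only [List.foldl_cons]
    have hstep : ((M + 1 : Nat) : Int) - 1 - 1 = ((M : Nat) : Int) - 1 := by push_cast; ring
    have harg : ((M + 1 : Nat) : Int) - 1 = ((M : Nat) : Int) := by push_cast; ring
    rw [hstep, harg, Int.toNat_natCast]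
    rw [ih N (row.set M (c M)) (by omega) (by simpa using hrow)]
    rw [set_drop_lem row M (c ((M : Nat) : Int)) (by omega)]
    rw [List.range_succ, List.map_append]
    simp

-- canonical per-pair row: what A's b-loop writes into grid row cnt
def pvGridRow (n : Int) (p : Int × Int) : List String :=
  (List.range n.toNat).map (fun (k : Nat) =>
    if (pvBits p.1 ++ List.replicate ((n : Int) - ((pvBits p.1).length : Int)).toNat (0:Int)).getD (n - (k : Int) - 1).toNat 0 = 1
       ∨ (pvBits p.2 ++ List.replicate ((n : Int) - ((pvBits p.2).length : Int)).toNat (0:Int)).getD (n - (k : Int) - 1).toNat 0 = 1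
    then "#" else " ")

lemma foldl_step (n : Int) (hn : 0 ≤ n) :
    ∀ (ps : List (Int × Int)) (pre : List (List String)) (k : Nat),
    pre.length = k → k + ps.length ≤ n.toNat →
    ps.foldl (pvStep n) (pre ++ List.replicate (n.toNat - k) (List.replicate n.toNat "0"), k)
      = (pre ++ ps.map (pvGridRow n) ++ List.replicate (n.toNat - k - ps.length) (List.replicate n.toNat "0"), k + ps.length) := by
  intro ps
  induction ps with
  | nil => intro pre k hk hle; simp
  | cons p ps ih =>
    intro pre k hk hle
    simp only [List.foldl_cons, List.length_cons] at *
    have hkN : k < n.toNat := by omega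
    have hstep : pvStep n (pre ++ List.replicate (n.toNat - k) (List.replicate n.toNat "0"), k) p
        = ((pre ++ [pvGridRow n p]) ++ List.replicate (n.toNat - (k + 1)) (List.replicate n.toNat "0"), k + 1) := by
      unfold pvStep
      simp only
      have hlen : (pre ++ List.replicate (n.toNat - k) (List.replicate n.toNat "0")).length = n.toNat := by
        simp [hk]; omega
      rw [foldl_set2 _ _ _ k (by rw [hlen]; exact hkN)]
      have hget : (pre ++ List.replicate (n.toNat - k) (List.replicate n.toNat "0")).getD k []
          = List.replicate n.toNat "0" := by
        rw [List.getD_append_right _ _ _ _ (by omega), hk, Nat.sub_self]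
        exact List.getD_replicate _ (by omega)
      rw [hget]
      have hnn : (n : Int) - 1 = ((n.toNat : Nat) : Int) - 1 := by
        rw [Int.toNat_of_nonneg hn]
      rw [hnn, foldl_rowset _ n.toNat n.toNat (List.replicate n.toNat "0") le_rfl (by simp)]
      rw [List.drop_replicate]
      have hrowid : (List.range n.toNat).map (fun (k : Nat) =>
          if (pvBits p.1 ++ List.replicate ((n : Int) - ((pvBits p.1).length : Int)).toNat (0:Int)).getD (n - (k : Int) - 1).toNat 0 = 1
             ∨ (pvBits p.2 ++ List.replicate ((n : Int) - ((pvBits p.2).length : Int)).toNat (0:Int)).getD (n - (k : Int) - 1).toNat 0 = 1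
          then "#" else " ") = pvGridRow n p := rfl
      rw [Nat.sub_self, List.replicate_zero, List.append_nil, hrowid]
      rw [List.set_append_right _ _ (by omega), hk, Nat.sub_self]
      have : (List.replicate (n.toNat - k) (List.replicate n.toNat "0")).set 0 (pvGridRow n p)
          = pvGridRow n p :: List.replicate (n.toNat - (k + 1)) (List.replicate n.toNat "0") := by
        have h1 : n.toNat - k = (n.toNat - (k + 1)) + 1 := by omega
        rw [h1, List.replicate_succ]
        rfl
      rw [this]
      simp
    rw [hstep, ih (pre ++ [pvGridRow n p]) (k + 1) (by simp [hk]) (by omega)]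
    simp only [Prod.mk.injEq]
    constructor
    · simp only [List.map_cons]
      rw [List.append_assoc pre [pvGridRow n p]]
      congr 2
      omega
    · omega

lemma row_eq (n : Int) (hn : 0 ≤ n) (p : Int × Int) (h1 : 0 ≤ p.1) (h2 : 0 ≤ p.2) :
    String.ofList ((List.range n.toNat).map (fun j => if (pvGridRow n p).getD j "0" = "#" then '#' else ' '))
      = String.ofList ((PySem.List.pyRange (n - 1) (-1) (-1)).map (fun k =>
          if PySem.Int.band (PySem.Int.bor p.1 p.2 >>> k.toNat) 1 = 1 then '#' else ' ')) := by
  congr 1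
  rw [PySem.List.pyRange_neg_one, List.map_map]
  have hcnt : ((n - 1) - (-1)).toNat = n.toNat := by omega
  rw [hcnt]
  apply List.map_congr_left
  intro j hj
  rw [List.mem_range] at hj
  unfold pvGridRow
  rw [PySem.List.getD_map_range _ _ _ _ hj]
  simp only [Function.comp_apply]
  have hk : (n - 1 - (j:Int)).toNat = n.toNat - 1 - j := by omega
  have hidx : (n - (j:Int) - 1).toNat = n.toNat - 1 - j := by omega
  rw [hk, hidx]
  rw [PySem.Int.bor_of_nonneg h1 h2]
  have hc1 := pad_getD p.1 h1 ((n : Int) - ((pvBits p.1).length : Int)).toNat (n.toNat - 1 - j)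
  have hc2 := pad_getD p.2 h2 ((n : Int) - ((pvBits p.2).length : Int)).toNat (n.toNat - 1 - j)
  have hrhs : (PySem.Int.band ((((p.1.toNat ||| p.2.toNat) : Nat) : Int) >>> (((n.toNat - 1 - j : Nat)) : Int)) 1 = 1)
      ↔ ((p.1.toNat ||| p.2.toNat).testBit (n.toNat - 1 - j) = true) := by
    rw [Int.shiftRight_natCast, show ((1:Int)) = ((1:Nat):Int) from rfl, PySem.Int.band_natCast, and_one_eq]
    rcases h : (p.1.toNat ||| p.2.toNat).testBit (n.toNat - 1 - j) <;> simp
  simp only [hrhs, Nat.testBit_or]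
  by_cases hb : (p.1.toNat.testBit (n.toNat - 1 - j) || p.2.toNat.testBit (n.toNat - 1 - j)) = true
  · have hc : ((pvBits p.1 ++ List.replicate ((n : Int) - ((pvBits p.1).length : Int)).toNat (0:Int)).getD (n.toNat - 1 - j) 0 = 1
        ∨ (pvBits p.2 ++ List.replicate ((n : Int) - ((pvBits p.2).length : Int)).toNat (0:Int)).getD (n.toNat - 1 - j) 0 = 1) := by
      rcases Bool.or_eq_true_iff.mp hb with h | h
      · exact Or.inl (hc1.mpr h)
      · exact Or.inr (hc2.mpr h)
    rw [if_pos hc, if_pos hb]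
    simp
  · have hc : ¬((pvBits p.1 ++ List.replicate ((n : Int) - ((pvBits p.1).length : Int)).toNat (0:Int)).getD (n.toNat - 1 - j) 0 = 1
        ∨ (pvBits p.2 ++ List.replicate ((n : Int) - ((pvBits p.2).length : Int)).toNat (0:Int)).getD (n.toNat - 1 - j) 0 = 1) := by
      simp only [Bool.or_eq_true, not_or, Bool.not_eq_true] at hb
      rintro (h | h)
      · exact absurd (hc1.mp h) (by simp [hb.1])
      · exact absurd (hc2.mp h) (by simp [hb.2])
    rw [if_neg hc, if_neg hb]
    simp

lemma solution_eq (n : Int) (arr1 : List Int) (arr2 : List Int) (hpre : Pre_solution n arr1 arr2) :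
    solution n arr1 arr2 = solution_alt n arr1 arr2 := by
  obtain ⟨hlen, hnonneg⟩ := hpre
  unfold solution solution_alt
  by_cases hn : 0 ≤ n
  · -- main case
    have hz : (arr1.zip arr2).length ≤ n.toNat := hlen
    have hgrid := foldl_step n hn (arr1.zip arr2) [] 0 rfl (by omega)
    simp only [List.nil_append, Nat.sub_zero, Nat.zero_add] at hgrid
    simp only [hgrid]
    rw [show n = ((n.toNat : Nat) : Int) from (Int.toNat_of_nonneg hn).symm]
    rw [PySem.List.pyRange_zero_natCast]
    simp only [PySem.List.foldl_append_singleton_eq_map, List.nil_append, List.map_map,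
      Function.comp_def, Int.toNat_natCast]
    simp only [List.length_map]
    rw [show ((n.toNat : Int) - ((arr1.zip arr2).length : Int)).toNat = n.toNat - (arr1.zip arr2).length from by omega]
    apply List.ext_getElem
    · simp only [List.length_map, List.length_append, List.length_replicate, List.length_range]
      omega
    intro i h1 h2
    simp only [List.getElem_map, List.getElem_range] at *
    by_cases hi : i < (arr1.zip arr2).length
    · rw [List.getElem_append_left (by simpa using hi)]
      simp only [List.getElem_map]
      have hgetD : ((List.map (pvGridRow ((n.toNat : Nat) : Int)) (arr1.zip arr2) ++
            List.replicate (n.toNat - (arr1.zip arr2).length) (List.replicate n.toNat "0")).getD i [])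
          = pvGridRow ((n.toNat : Nat) : Int) (arr1.zip arr2)[i] := by
        rw [List.getD_append _ _ _ _ (by simpa using hi)]
        rw [List.getD_eq_getElem _ _ (by simpa using hi)]
        simp
      rw [hgetD]
      have hp := hnonneg (arr1.zip arr2)[i] (List.getElem_mem _)
      have hre := row_eq ((n.toNat : Nat) : Int) (by positivity) (arr1.zip arr2)[i] hp.1 hp.2
      simp only [Int.toNat_natCast] at hre
      exact hre
    · rw [List.getElem_append_right (by simp only [List.length_map]; omega)]
      simp only [List.getElem_replicate, List.length_map]
      have hgetD : ((List.map (pvGridRow ((n.toNat : Nat) : Int)) (arr1.zip arr2) ++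
            List.replicate (n.toNat - (arr1.zip arr2).length) (List.replicate n.toNat "0")).getD i [])
          = List.replicate n.toNat "0" := by
        rw [List.getD_append_right _ _ _ _ (by simp only [List.length_map]; omega)]
        exact List.getD_replicate _ (by
          simp only [List.length_map, List.length_range] at h1 ⊢
          omega)
      rw [hgetD]
      congr 1
      rw [List.map_congr_left (g := fun _ => ' ') (by
        intro j hj
        rw [List.mem_range] at hj
        rw [List.getD_replicate _ hj]
        simp)]
      simp [List.map_const']
  · have hn2 : n < 0 := by omega
    -- n < 0: zip is empty, both sides []
    have hz : arr1.zip arr2 = [] := List.eq_nil_of_length_eq_zero (by omega)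
    rw [hz]
    simp [PySem.List.pyRange_one_eq_nil (by omega : n ≤ 0), Int.toNat_of_nonpos (by omega : n ≤ 0)]

-- ===== VERDICT (by name: the statement is the Claim_ definition above) =====
theorem solution_spec : Claim_equal_solution := by
  intro n arr1 arr2 _ hpre
  unfold Spec_solution
  exact solution_eq n arr1 arr2 hpre
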